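-- pv_equiv track=rewrite | github.com/wansang93/Algorithm | Programmers/Challenge/월간 코드 챌린지 시즌1/quiz03.py | solution
-- ===== SOURCE A (Python) =====
-- def solution(a):
--     answer = 1
--     len_a = len(a)
--
--     # min 값 구하기
--     min_index = 0
--     min_value = a[0]
--     for i in range(len(a)):
--         if a[i] < min_value:
--             min_index = i
--             min_value = a[i]
--
--     # min_index 전까지 answer 구하기
--     min_value = a[0]
--     for i in range(min_index):
--         if min_value >= a[i]:
--             min_value = a[i]
--             answer += 1
--
--     # 뒤에서부터 min_index 전까지 answer 구하기
--     min_value = a[-1]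
--     for i in range(len_a-1, min_index, -1):
--         if min_value >= a[i]:
--             min_value = a[i]
--             answer += 1
--
--     return answer
-- ===== SOURCE B (Python) =====
-- def _prefix_mins(xs):
--     out = []
--     cur = None
--     for x in xs:
--         cur = x if cur is None else min(cur, x)
--         out.append(cur)
--     return out
--
--
-- def _records(xs):
--     return sum(x == p for x, p in zip(xs, _prefix_mins(xs)))
--
--
-- def solution(a):
--     # Inclusion-exclusion over the whole array, never locating the minimum's
--     # position: an index is visible iff it is a forward record or a backward
--     # record, and it is both iff it holds the global minimum value.
--     lo = min(a)
--     return _records(a) + _records(a[::-1]) - a.count(lo)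
-- ===== Notes on version B (the rewrite author's own statement) =====
-- stated objective: alternative
-- what changed: Instead of locating the first global-minimum index and counting running-min records on each side of it, B never computes an argmin: it counts forward records over the whole array and backward records over the whole reversed array and subtracts the number of occurrences of the minimum value (inclusion-exclusion, since an index is both a forward and a backward record exactly when it holds the global minimum).
import Mathlib
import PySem

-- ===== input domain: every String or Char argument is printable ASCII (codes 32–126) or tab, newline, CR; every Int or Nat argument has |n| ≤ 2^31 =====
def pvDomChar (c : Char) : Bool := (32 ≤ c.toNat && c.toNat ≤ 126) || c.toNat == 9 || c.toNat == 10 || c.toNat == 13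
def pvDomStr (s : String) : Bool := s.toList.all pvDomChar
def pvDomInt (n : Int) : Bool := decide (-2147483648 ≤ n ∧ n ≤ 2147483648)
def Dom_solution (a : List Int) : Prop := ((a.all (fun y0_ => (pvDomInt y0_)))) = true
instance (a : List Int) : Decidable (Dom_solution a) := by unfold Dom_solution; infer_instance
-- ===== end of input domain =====

-- B drops A's argmin localisation entirely: it counts forward records over the whole array plus
-- backward records over the whole reversed array and subtracts the multiplicity of the minimum
-- value (inclusion-exclusion). Objective: alternative; same O(n) cost.

-- ===== PORT A =====
def solution (a : List Int) : Int :=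
  let lenA : Int := (a.length : Int)
  let s0 : Int × Int :=
    (PySem.List.pyRange 0 (a.length : Int) 1).foldl
      (fun s i =>
        if PySem.List.pyGetD a i 0 < s.2 then (i, PySem.List.pyGetD a i 0) else s)
      (0, PySem.List.pyGetD a 0 0)
  let minIndex : Int := s0.1
  let s1 : Int × Int :=
    (PySem.List.pyRange 0 minIndex 1).foldl
      (fun s i =>
        if s.2 ≥ PySem.List.pyGetD a i 0 then (s.1 + 1, PySem.List.pyGetD a i 0) else s)
      (1, PySem.List.pyGetD a 0 0)
  let s2 : Int × Int :=
    (PySem.List.pyRange (lenA - 1) minIndex (-1)).foldl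
      (fun s i =>
        if s.2 ≥ PySem.List.pyGetD a i 0 then (s.1 + 1, PySem.List.pyGetD a i 0) else s)
      (s1.1, PySem.List.pyGetD a (-1) 0)
  s2.1

-- ===== PORT B =====
def prefixMins (xs : List Int) : List Int :=
  (xs.foldl
    (fun (s : List Int × Option Int) x =>
      let cur : Int := match s.2 with | none => x | some c => min c x
      (s.1 ++ [cur], some cur))
    ([], none)).1

def records (xs : List Int) : Int :=
  ((xs.zip (prefixMins xs)).map (fun p => if p.1 = p.2 then (1 : Int) else 0)).sum

def solution_alt (a : List Int) : Int :=
  let lo : Int := (PySem.List.min? a (fun x => x)).getD 0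
  records a + records ((PySem.List.slice? a none none (-1)).getD []) - (PySem.List.count a lo : Int)

-- ===== PRECONDITION & SPEC =====
-- Pre_ excludes only the empty list, on which A raises IndexError (a[0]).
def Pre_solution (a : List Int) : Prop := a ≠ []
instance (a : List Int) : Decidable (Pre_solution a) := by unfold Pre_solution; infer_instance
def pvWitness_solution : List Int := [3, 1, 2]

def Spec_solution (a : List Int) (out : Int) : Prop := out = solution_alt a
instance (a : List Int) (out : Int) : Decidable (Spec_solution a out) := by unfold Spec_solution; infer_instance

-- ===== CLAIM (what is proved, stated in full; the proofs are below) =====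
def Claim_equal_solution : Prop := ∀ (a : List Int), Dom_solution a → Pre_solution a → Spec_solution a (solution a)

-- ===== LEMMAS AND PROOFS =====

-- record count with a current running minimum (proof-side characterisation of both programs)
def rcount : Int → List Int → Int
  | _, [] => 0
  | m, x :: t => if x ≤ m then 1 + rcount x t else rcount m t

-- prefix minima, structurally (proof-side view of B's prefixMins loop)
def pmL : Int → List Int → List Int
  | _, [] => []
  | m, x :: t => min m x :: pmL (min m x) t

lemma prefixMins_go (t : List Int) (acc : List Int) (m : Int) :
    (t.foldl
      (fun (s : List Int × Option Int) x =>
        let cur : Int := match s.2 with | none => x | some c => min c x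
        (s.1 ++ [cur], some cur))
      (acc, some m)) = (acc ++ pmL m t, some ((m :: pmL m t).getLast (by simp))) := by
  induction t generalizing acc m with
  | nil => simp [pmL]
  | cons x t ih =>
    simp only [List.foldl_cons, pmL, ih]
    refine Prod.ext ?_ ?_
    · simp
    · simp only
      congr 1

lemma prefixMins_cons (x : Int) (t : List Int) :
    prefixMins (x :: t) = x :: pmL x t := by
  simp only [prefixMins, List.foldl_cons]
  rw [show ((([] : List Int) ++ [x], some x) : List Int × Option Int) = ([x], some x) by simp] at *
  rw [prefixMins_go t [x] x]
  simp

lemma zipsum_pmL (t : List Int) (m : Int) :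
    ((t.zip (pmL m t)).map (fun p => if p.1 = p.2 then (1 : Int) else 0)).sum = rcount m t := by
  induction t generalizing m with
  | nil => simp [pmL, rcount]
  | cons x t ih =>
    simp only [pmL, List.zip_cons_cons, List.map_cons, List.sum_cons, rcount]
    by_cases h : x ≤ m
    · have hx : min m x = x := by omega
      simp [ih, h]
    · have hx : min m x = m := by omega
      have hne : x ≠ m := by omega
      simp [hx, hne, ih, h]

lemma records_cons (x : Int) (t : List Int) : records (x :: t) = 1 + rcount x t := by
  simp [records, prefixMins_cons, zipsum_pmL]

lemma records_nil : records [] = 0 := by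
  simp [records]

-- A's record loop over a plain list
lemma foldl_step (t : List Int) (c m : Int) :
    (t.foldl (fun (s : Int × Int) x => if s.2 ≥ x then (s.1 + 1, x) else s) (c, m)).1
      = c + rcount m t := by
  induction t generalizing c m with
  | nil => simp [rcount]
  | cons x t ih =>
    simp only [List.foldl_cons, rcount]
    by_cases h : x ≤ m
    · simp [h, ih]; ring
    · have h' : ¬ (m ≥ x) := by omega
      simp [h, ih]

lemma foldl_step_head (t : List Int) (c x : Int) :
    ((x :: t).foldl (fun (s : Int × Int) y => if s.2 ≥ y then (s.1 + 1, y) else s) (c, x)).1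
      = c + records (x :: t) := by
  simp only [List.foldl_cons, ge_iff_le, le_refl, if_pos, records_cons, foldl_step]
  ring

-- A's argmin loop, structurally
def foldArg : List Int → Int → Int × Int → Int × Int
  | [], _, s => s
  | x :: t, i, s => foldArg t (i + 1) (if x < s.2 then (i, x) else s)

lemma foldl_min_le (t : List Int) (v : Int) : t.foldl min v ≤ v := by
  induction t generalizing v with
  | nil => simp
  | cons x t ih => exact le_trans (ih (min v x)) (min_le_left _ _)

lemma foldArg_spec (t : List Int) (i j v : Int) :
    foldArg t i (j, v)
      = (if t.foldl min v < v then i + (t.idxOf (t.foldl min v) : Int) else j, t.foldl min v) := by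
  induction t generalizing i j v with
  | nil => simp [foldArg]
  | cons x t ih =>
    simp only [foldArg, List.foldl_cons]
    by_cases hx : x < v
    · have hmin : min v x = x := by omega
      rw [hmin]
      rw [if_pos hx, ih]
      have hle : t.foldl min x ≤ x := foldl_min_le t x
      have hlt : t.foldl min x < v := by omega
      rw [if_pos hlt]
      by_cases heq : t.foldl min x = x
      · have : ¬ (t.foldl min x < x) := by omega
        rw [if_neg this]
        have : (x :: t).idxOf (t.foldl min x) = 0 := by
          rw [heq]; simp
        rw [this]; simp
      · have hlt2 : t.foldl min x < x := by omega
        rw [if_pos hlt2]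
        have : (x :: t).idxOf (t.foldl min x) = t.idxOf (t.foldl min x) + 1 := by
          simp [Ne.symm heq]
        rw [this]
        refine Prod.ext (by push_cast; ring) rfl
    · have hmin : min v x = v := by omega
      rw [hmin, if_neg hx, ih]
      by_cases hlt : t.foldl min v < v
      · rw [if_pos hlt, if_pos hlt]
        have hne : x ≠ t.foldl min v := by omega
        have : (x :: t).idxOf (t.foldl min v) = t.idxOf (t.foldl min v) + 1 := by
          simp [hne]
        rw [this]
        refine Prod.ext (by push_cast; ring) rfl
      · rw [if_neg hlt, if_neg hlt]

lemma foldA (a : List Int) (t : List Int) (off : Nat) (ht : a.drop off = t) (s : Int × Int) :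
    (PySem.List.pyRange (off : Int) (a.length : Int) 1).foldl
        (fun s i =>
          if PySem.List.pyGetD a i 0 < s.2 then (i, PySem.List.pyGetD a i 0) else s) s
      = foldArg t (off : Int) s := by
  induction t generalizing off s with
  | nil =>
    have hlen : a.length ≤ off := by
      by_contra h
      push Not at h
      have := List.drop_eq_nil_iff.1 ht
      omega
    rw [PySem.List.pyRange_one_eq_nil (by exact_mod_cast hlen)]
    simp [foldArg]
  | cons x t' ih =>
    have hoff : off < a.length := by
      by_contra h
      push Not at h
      rw [List.drop_eq_nil_iff.2 h] at ht
      simp at ht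
    rw [PySem.List.pyRange_one_cons (by exact_mod_cast hoff)]
    simp only [List.foldl_cons]
    have hget : PySem.List.pyGetD a (off : Int) 0 = x := by
      rw [PySem.List.pyGetD_natCast]
      have : a[off]? = some x := by
        have := List.getElem?_drop (xs := a) (i := off) (j := 0)
        rw [ht] at this
        simpa using this.symm
      simp [List.getD, this]
    rw [hget]
    have hdrop : a.drop (off + 1) = t' := by
      have h2 := List.drop_drop (l := a) (i := 1) (j := off)
      rw [ht] at h2
      simpa [show 1 + off = off + 1 by ring] using h2.symm
    simp only [foldArg]
    rw [show ((off : Int) + 1) = ((off + 1 : Nat) : Int) by push_cast; ring]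
    exact ih (off + 1) hdrop _

lemma loop1_eq (x : Int) (t : List Int) :
    (PySem.List.pyRange 0 (((x :: t).length) : Int) 1).foldl
      (fun s i =>
        if PySem.List.pyGetD (x :: t) i 0 < s.2 then (i, PySem.List.pyGetD (x :: t) i 0) else s)
      (0, PySem.List.pyGetD (x :: t) 0 0)
    = ((((x :: t).idxOf (t.foldl min x)) : Int), t.foldl min x) := by
  have h := foldA (x :: t) (x :: t) 0 rfl (0, PySem.List.pyGetD (x :: t) 0 0)
  simp only [Nat.cast_zero] at h
  rw [h]
  rw [PySem.List.pyGetD_zero_cons]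
  simp only [foldArg, if_neg (lt_irrefl x), zero_add]
  rw [foldArg_spec t 1 0 x]
  have hle := foldl_min_le t x
  by_cases hlt : t.foldl min x < x
  · rw [if_pos hlt]
    have hne : ¬ (x == t.foldl min x) = true := by simp; omega
    rw [List.idxOf_cons]
    simp only [hne, cond_false]
    refine Prod.ext (by push_cast; ring) rfl
  · have heq : t.foldl min x = x := by omega
    rw [if_neg hlt, List.idxOf_cons]
    have : (x == t.foldl min x) = true := by simp [heq]
    simp [this]

lemma loop2_eq (a : List Int) (mB : Nat) (hmB : mB ≤ a.length) (init : Int × Int) :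
    (PySem.List.pyRange 0 (mB : Int) 1).foldl
      (fun s i =>
        if s.2 ≥ PySem.List.pyGetD a i 0 then (s.1 + 1, PySem.List.pyGetD a i 0) else s) init
    = (a.take mB).foldl (fun s y => if s.2 ≥ y then (s.1 + 1, y) else s) init := by
  have hlen : ((a.take mB).length : Int) = (mB : Int) := by
    simp [List.length_take]; omega
  have hcongr :
      (PySem.List.pyRange 0 (mB : Int) 1).foldl
        (fun s i =>
          if s.2 ≥ PySem.List.pyGetD a i 0 then (s.1 + 1, PySem.List.pyGetD a i 0) else s) init
      = (PySem.List.pyRange 0 (mB : Int) 1).foldl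
        (fun s i =>
          if s.2 ≥ PySem.List.pyGetD (a.take mB) i 0 then (s.1 + 1, PySem.List.pyGetD (a.take mB) i 0) else s) init := by
    apply PySem.List.foldl_congr_mem
    intro acc i hi
    rcases PySem.List.mem_pyRange_one.1 hi with ⟨h0, h1⟩
    have hilen : i < (a.length : Int) := by omega
    have hitake : i < ((a.take mB).length : Int) := by omega
    rw [PySem.List.pyGetD_eq_getElem _ _ h0 hilen,
        PySem.List.pyGetD_eq_getElem _ _ h0 hitake, List.getElem_take]
  rw [hcongr, ← hlen]
  exact PySem.List.foldl_pyRange_zero_pyGetD' (a.take mB) 0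
    (fun s y => if s.2 ≥ y then (s.1 + 1, y) else s) init

lemma loop3_eq (a : List Int) (mB : Nat) (init : Int × Int) :
    (PySem.List.pyRange ((a.length : Int) - 1) (mB : Int) (-1)).foldl
      (fun s i =>
        if s.2 ≥ PySem.List.pyGetD a i 0 then (s.1 + 1, PySem.List.pyGetD a i 0) else s) init
    = ((a.drop (mB + 1)).reverse).foldl (fun s y => if s.2 ≥ y then (s.1 + 1, y) else s) init := by
  rw [PySem.List.pyRange_neg_one_eq_reverse]
  rw [show (a.length : Int) - 1 + 1 = ((a.length : Int)) by ring]
  have hmap := PySem.List.map_pyGetD_pyRange' a 0 (a := (mB : Int) + 1) (by positivity)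
  have hcast : (((mB : Int) + 1)).toNat = mB + 1 := by omega
  rw [hcast] at hmap
  calc (PySem.List.pyRange ((mB : Int) + 1) ((a.length : Int)) 1).reverse.foldl
        (fun s i =>
          if s.2 ≥ PySem.List.pyGetD a i 0 then (s.1 + 1, PySem.List.pyGetD a i 0) else s) init
      = ((PySem.List.pyRange ((mB : Int) + 1) ((a.length : Int)) 1).reverse.map
          (fun j => PySem.List.pyGetD a j 0)).foldl
          (fun s y => if s.2 ≥ y then (s.1 + 1, y) else s) init := by
        rw [List.foldl_map]
    _ = ((a.drop (mB + 1)).reverse).foldl (fun s y => if s.2 ≥ y then (s.1 + 1, y) else s) init := by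
        rw [List.map_reverse, hmap]

lemma count_take (x : Int) (t : List Int) (mB : Nat) :
    (((x :: t).take mB).foldl (fun s y => if s.2 ≥ y then (s.1 + 1, y) else s) (1, x)).1
      = 1 + records ((x :: t).take mB) := by
  cases mB with
  | zero => simp [records, prefixMins]
  | succ n =>
    rw [List.take_cons (by omega)]
    simp only [Nat.add_sub_cancel]
    rw [foldl_step_head]

lemma count_rev (a : List Int) (k : Nat) (c : Int) (ha : a ≠ []) :
    (((a.drop k).reverse).foldl (fun s y => if s.2 ≥ y then (s.1 + 1, y) else s)
        (c, PySem.List.pyGetD a (-1) 0)).1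
      = c + records ((a.drop k).reverse) := by
  rcases List.eq_nil_or_concat (a.drop k) with hnil | hc
  · rw [hnil]; simp [records, prefixMins]
  · obtain ⟨ys, y, hys⟩ := hc
    rw [List.concat_eq_append] at hys
    have hconcat : a = (a.take k ++ ys) ++ [y] := by
      rw [List.append_assoc, ← hys, List.take_append_drop]
    have hlast : PySem.List.pyGetD a (-1) 0 = y := by
      rw [PySem.List.pyGetD_neg_one a 0 ha]
      have h1 : a.getLast? = some y := by rw [hconcat]; exact List.getLast?_concat
      have h2 : a.getLast? = some (a.getLast ha) := List.getLast?_eq_some_getLast ha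
      rw [h1] at h2
      exact (Option.some.inj h2).symm
    rw [hys, hlast, List.reverse_append, List.reverse_singleton, List.singleton_append]
    rw [foldl_step_head]

-- A's value, characterised through the first-argmin decomposition
lemma A_eq (x : Int) (t : List Int) :
    solution (x :: t)
      = 1 + records ((x :: t).take ((x :: t).idxOf (t.foldl min x)))
          + records (((x :: t).drop ((x :: t).idxOf (t.foldl min x) + 1)).reverse) := by
  have hmem : t.foldl min x ∈ x :: t :=
    PySem.List.min?_mem (PySem.List.min?_id_cons x t)
  have hmBlt : (x :: t).idxOf (t.foldl min x) < (x :: t).length :=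
    List.idxOf_lt_length_of_mem hmem
  have hne : (x :: t) ≠ ([] : List Int) := by simp
  simp only [solution]
  rw [loop1_eq x t]
  simp only [PySem.List.pyGetD_zero_cons]
  rw [loop2_eq (x :: t) ((x :: t).idxOf (t.foldl min x)) (le_of_lt hmBlt),
      loop3_eq (x :: t) ((x :: t).idxOf (t.foldl min x)),
      count_rev (x :: t) ((x :: t).idxOf (t.foldl min x) + 1) _ hne,
      count_take x t ((x :: t).idxOf (t.foldl min x))]

-- ===== B-side lemmas (inclusion-exclusion) =====

lemma lo_le_foldl_min (u : List Int) (x lo : Int) (hx : lo ≤ x) (hu : ∀ y ∈ u, lo ≤ y) :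
    lo ≤ u.foldl min x := by
  induction u generalizing x with
  | nil => simpa using hx
  | cons z u ih =>
    simp only [List.foldl_cons]
    exact ih (min x z) (le_min hx (hu z (by simp))) (fun y hy => hu y (by simp [hy]))

lemma foldl_min_le_mem (x : Int) (t : List Int) : ∀ y ∈ x :: t, t.foldl min x ≤ y := by
  induction t generalizing x with
  | nil =>
    intro y hy
    rw [List.mem_singleton] at hy
    subst hy
    simp
  | cons z t ih =>
    intro y hy
    simp only [List.foldl_cons]
    rcases List.mem_cons.1 hy with h1 | hy'
    · subst h1
      exact le_trans (foldl_min_le t (min y z)) (min_le_left _ _)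
    · rcases List.mem_cons.1 hy' with h2 | h3
      · subst h2
        exact le_trans (foldl_min_le t (min x y)) (min_le_right _ _)
      · exact ih (min x z) y (List.mem_cons_of_mem _ h3)

lemma rcount_append (p q : List Int) (m : Int) :
    rcount m (p ++ q) = rcount m p + rcount (p.foldl min m) q := by
  induction p generalizing m with
  | nil => simp [rcount]
  | cons x p ih =>
    by_cases h : x ≤ m
    · have hm : min m x = x := by omega
      simp only [List.cons_append, rcount, if_pos h, List.foldl_cons, hm, ih]
      ring
    · have hm : min m x = m := by omega
      simp only [List.cons_append, rcount, if_neg h, List.foldl_cons, hm, ih]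

lemma rcount_count (v : List Int) (lo : Int) (hv : ∀ y ∈ v, lo ≤ y) :
    rcount lo v = (v.count lo : Int) := by
  induction v with
  | nil => simp [rcount]
  | cons x v ih =>
    have hx : lo ≤ x := hv x (by simp)
    have ih' := ih (fun y hy => hv y (by simp [hy]))
    simp only [rcount, List.count_cons]
    by_cases h : x ≤ lo
    · have hxe : x = lo := by omega
      rw [if_pos h, hxe, ih']
      simp only [BEq.rfl, if_pos]
      push_cast
      ring
    · have hne : ¬ (x == lo) = true := by simp; omega
      rw [if_neg h, ih']
      simp [hne]

lemma records_split (u v : List Int) (lo : Int)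
    (hu : ∀ y ∈ u, lo ≤ y) (hv : ∀ y ∈ v, lo ≤ y) :
    records (u ++ lo :: v) = records u + 1 + (v.count lo : Int) := by
  cases u with
  | nil =>
    simp only [List.nil_append, records_cons, records_nil, rcount_count v lo hv]
    ring
  | cons x u =>
    have hx : lo ≤ x := hu x (by simp)
    have hu' : ∀ y ∈ u, lo ≤ y := fun y hy => hu y (by simp [hy])
    have hmin : lo ≤ u.foldl min x := lo_le_foldl_min u x lo hx hu'
    simp only [List.cons_append, records_cons, rcount_append]
    simp only [rcount, if_pos hmin, rcount_count v lo hv]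
    ring

lemma not_mem_take_idxOf (l : List Int) (lo : Int) : lo ∉ l.take (l.idxOf lo) := by
  induction l with
  | nil => simp
  | cons z t ih =>
    by_cases hz : z = lo
    · subst hz; simp
    · have : (z == lo) = false := by simp [hz]
      simp only [List.idxOf_cons, this, cond_false, List.take_succ_cons, List.mem_cons]
      push Not
      exact ⟨Ne.symm hz, ih⟩

lemma B_eq (x : Int) (t : List Int) :
    solution_alt (x :: t)
      = 1 + records ((x :: t).take ((x :: t).idxOf (t.foldl min x)))
          + records (((x :: t).drop ((x :: t).idxOf (t.foldl min x) + 1)).reverse) := by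
  set l : List Int := x :: t with hl
  set lo : Int := t.foldl min x with hlo
  have hmem : lo ∈ l := PySem.List.min?_mem (PySem.List.min?_id_cons x t)
  have hall : ∀ y ∈ l, lo ≤ y := foldl_min_le_mem x t
  set m : Nat := l.idxOf lo with hm
  have hmlt : m < l.length := List.idxOf_lt_length_of_mem hmem
  set p : List Int := l.take m with hp
  set rest : List Int := l.drop (m + 1) with hrest
  have hgm : l[m] = lo := List.getElem_idxOf hmlt
  have hdecomp : l = p ++ lo :: rest := by
    rw [hp, hrest, ← hgm, List.getElem_cons_drop hmlt, List.take_append_drop]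
  have hpsub : ∀ y ∈ p, lo ≤ y := fun y hy => hall y (List.mem_of_mem_take hy)
  have hrsub : ∀ y ∈ rest, lo ≤ y := fun y hy => hall y (List.mem_of_mem_drop hy)
  have hplo : lo ∉ p := not_mem_take_idxOf l lo
  have hpc : p.count lo = 0 := List.count_eq_zero.2 hplo
  have hprc : p.reverse.count lo = 0 := by
    rw [List.count_reverse]; exact hpc
  have hcount : l.count lo = 1 + rest.count lo := by
    rw [hdecomp, List.count_append, List.count_cons, hpc]
    simp only [BEq.rfl, if_pos]
    omega
  have hrev : l.reverse = rest.reverse ++ lo :: p.reverse := by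
    rw [hdecomp]
    simp
  have hmin? : PySem.List.min? l (fun x => x) = some lo := PySem.List.min?_id_cons x t
  have hrec1 : records l = records p + 1 + (rest.count lo : Int) :=
    hdecomp ▸ records_split p rest lo hpsub hrsub
  have hrec2 : records l.reverse = records rest.reverse + 1 := by
    rw [hrev, records_split rest.reverse p.reverse lo
          (fun y hy => hrsub y (List.mem_reverse.1 hy))
          (fun y hy => hpsub y (List.mem_reverse.1 hy)),
        hprc]
    simp
  show solution_alt l = 1 + records p + records rest.reverse
  simp only [solution_alt, hmin?, Option.getD_some, PySem.List.slice?_none_none_neg_one,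
    PySem.List.count_eq, hrec1, hrec2, hcount]
  push_cast
  ring

-- ===== VERDICT (by name: the statement is the Claim_ definition above) =====
theorem solution_spec : Claim_equal_solution := by
  intro a _ hpre
  unfold Spec_solution
  obtain ⟨x, t, rfl⟩ := List.exists_cons_of_ne_nil hpre
  rw [A_eq x t, B_eq x t]
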